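-- pv_equiv track=rewrite | github.com/bcgsc/straglr | src/motif_finder.py | get_partials
-- ===== SOURCE A (Python) =====
-- def get_partials(seq):
--     max_del_size = len(seq) - 2
--     subseqs = set()
--     for d in range(1, max_del_size + 1, 1):
--         for i in range(len(seq)):
--             if i + d <= len(seq):
--                 subseq = seq[:i] + seq[i+d:]
--                 subseqs.add(subseq)
--     return sorted(list(subseqs), key=lambda s: (-len(s), s))
-- ===== SOURCE B (Python) =====
-- def get_partials(seq):
--     # Dedup without any set/hashing: for a fixed deletion length d, two deletion
--     # results seq[:i]+seq[i+d:] and seq[:j]+seq[j+d:] (i < j) are equal iff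
--     # seq[t] == seq[t+d] for every t in [i, j), so the distinct results are exactly
--     # those whose start i is a "run start": i == 0 or seq[i-1] != seq[i-1+d].
--     # Results of different d have different lengths, so per-d sorted blocks,
--     # concatenated in increasing d, realise A's (-len, s) order.
--     n = len(seq)
--     out = []
--     for d in range(1, n - 1):
--         block = [seq[:i] + seq[i + d:]
--                  for i in range(n - d + 1)
--                  if i == 0 or seq[i - 1] != seq[i - 1 + d]]
--         block.sort()
--         out.extend(block)
--     return out
-- ===== Notes on version B (the rewrite author's own statement) =====
-- stated objective: alternative
-- what changed: B removes A's hash-set and composite (-len,s)-keyed global sort entirely: duplicates for each deletion length d are eliminated by a local character test (keep i only when i==0 or seq[i-1]!=seq[i-1+d], correct because two deletion results of the same length are equal iff seq shifted by d agrees on the interval between their starts), and the per-d plainly-sorted blocks are concatenated in increasing d, which is already A's order since blocks have pairwise different lengths.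
import Mathlib
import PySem

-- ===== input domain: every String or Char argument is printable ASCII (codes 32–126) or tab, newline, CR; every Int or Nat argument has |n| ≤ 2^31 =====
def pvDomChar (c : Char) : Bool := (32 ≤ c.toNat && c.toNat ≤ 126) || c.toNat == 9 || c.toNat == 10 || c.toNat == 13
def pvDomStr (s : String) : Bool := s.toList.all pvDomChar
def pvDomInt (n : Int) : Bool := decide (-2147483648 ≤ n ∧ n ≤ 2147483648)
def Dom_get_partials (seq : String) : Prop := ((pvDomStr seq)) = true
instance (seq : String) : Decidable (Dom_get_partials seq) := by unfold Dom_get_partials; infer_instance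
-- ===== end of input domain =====

-- B drops A's hash-set and composite-keyed global sort: per deletion length d it keeps only
-- run-start deletion points (i == 0 or seq[i-1] != seq[i-1+d]), which are exactly the distinct
-- results, sorts each block plainly and concatenates (objective: alternative).

-- shared transliteration of the Python expression `seq[:i] + seq[i+d:]`
def pvSub (cs : List Char) (d i : Int) : String :=
  String.ofList (PySem.List.slice cs none (some i) ++ PySem.List.slice cs (some (i + d)) none)

-- ===== PORT A =====
def get_partials (seq : String) : List String :=
  PySem.List.sorted2
    ((PySem.List.pyRange 1 (((seq.toList.length : Int) - 2) + 1)).foldl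
      (fun subseqs d =>
        (PySem.List.pyRange 0 (seq.toList.length : Int)).foldl
          (fun subseqs i =>
            if i + d ≤ (seq.toList.length : Int) then PySem.Set.add subseqs (pvSub seq.toList d i)
            else subseqs)
          subseqs)
      PySem.Set.empty)
    (fun s => -(PySem.Str.len s)) (fun s => s)

-- ===== PORT B =====
def get_partials_alt (seq : String) : List String :=
  (PySem.List.pyRange 1 ((seq.toList.length : Int) - 1)).foldl
    (fun out d =>
      out ++ PySem.List.sorted
        (((PySem.List.pyRange 0 ((seq.toList.length : Int) - d + 1)).filter
            (fun i => (i == 0) ||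
              !(PySem.List.pyGet? seq.toList (i - 1) == PySem.List.pyGet? seq.toList (i - 1 + d)))).map
          (fun i => pvSub seq.toList d i))
        (fun s => s))
    []

-- ===== PRECONDITION & SPEC =====
def Spec_get_partials (seq : String) (out : List String) : Prop := out = get_partials_alt seq
instance (seq : String) (out : List String) : Decidable (Spec_get_partials seq out) := by unfold Spec_get_partials; infer_instance

-- ===== CLAIM (what is proved, stated in full; the proofs are below) =====
def Claim_equal_get_partials : Prop := ∀ (seq : String), Dom_get_partials seq → Spec_get_partials seq (get_partials seq)

-- ===== LEMMAS AND PROOFS =====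

-- the per-d list of raw (possibly duplicated) deletion results
def pvBucket (cs : List Char) (d : Int) : List String :=
  (PySem.List.pyRange 0 ((cs.length : Int) - d + 1)).map (fun i => pvSub cs d i)

-- pvSub at natural arguments, as take/drop
def pvSubN (cs : List Char) (dn k : Nat) : List Char := cs.take k ++ cs.drop (k + dn)

lemma pv_pvSub_natCast (cs : List Char) (dn k : Nat) :
    pvSub cs (dn : Int) (k : Int) = String.ofList (pvSubN cs dn k) := by
  unfold pvSub pvSubN
  rw [PySem.List.slice_to_natCast,
      show ((k : Int) + (dn : Int)) = (((k + dn : Nat) : Int)) by push_cast; ring,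
      PySem.List.slice_from_natCast]

lemma pv_getElem?_pvSubN (cs : List Char) (dn k : Nat) (hk : k ≤ cs.length) (m : Nat) :
    (pvSubN cs dn k)[m]? = if m < k then cs[m]? else cs[m + dn]? := by
  unfold pvSubN
  have hl : (cs.take k).length = k := by simp [hk]
  by_cases h : m < k
  · rw [List.getElem?_append_left (by omega), List.getElem?_take, if_pos h, if_pos h]
  · rw [List.getElem?_append_right (by omega), hl, List.getElem?_drop, if_neg h]
    congr 1
    omega

lemma pv_pvSubN_eq_iff (cs : List Char) (dn i k : Nat) (hik : i ≤ k) (hk : k ≤ cs.length) :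
    pvSubN cs dn i = pvSubN cs dn k ↔ ∀ t, i ≤ t → t < k → cs[t]? = cs[t + dn]? := by
  constructor
  · intro h t ht1 ht2
    have h' := congrArg (fun l => l[t]?) h
    simp only at h'
    rw [pv_getElem?_pvSubN cs dn i (le_trans hik hk) t,
        pv_getElem?_pvSubN cs dn k hk t, if_neg (by omega), if_pos (by omega)] at h'
    exact h'.symm
  · intro h
    apply List.ext_getElem?
    intro m
    rw [pv_getElem?_pvSubN cs dn i (le_trans hik hk) m, pv_getElem?_pvSubN cs dn k hk m]
    by_cases h1 : m < i
    · rw [if_pos h1, if_pos (by omega)]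
    · rw [if_neg h1]
      by_cases h2 : m < k
      · rw [if_pos h2]
        exact (h m (by omega) h2).symm
      · rw [if_neg h2]

-- generic: set(map f (range m)) keeps exactly the run starts, provided equal values
-- force the preceding neighbour equal
lemma pv_ofList_range_runStarts {α : Type} [DecidableEq α] (f : Nat → α) (q : Nat → Bool) :
    ∀ (m : Nat),
      (∀ i k, i < k → k < m → f i = f k → f (k - 1) = f k) →
      (∀ k, k < m → (q k = true ↔ (k = 0 ∨ f (k - 1) ≠ f k))) →
      PySem.Set.ofList ((List.range m).map f) = ((List.range m).filter q).map f := by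
  intro m
  induction m with
  | zero => intro _ _; simp
  | succ m ih =>
    intro H Hq
    rw [List.range_succ, List.map_append, List.map_singleton, PySem.Set.ofList_append_singleton,
        List.filter_append]
    by_cases hq : q m = true
    · have hnot : f m ∉ PySem.Set.ofList ((List.range m).map f) := by
        rw [PySem.Set.mem_ofList]
        intro hmem
        rcases List.mem_map.mp hmem with ⟨i, hi, hfi⟩
        rw [List.mem_range] at hi
        rcases (Hq m (by omega)).mp hq with h0 | hne
        · omega
        · exact hne (H i m hi (by omega) hfi)
      have hadd : PySem.Set.add (PySem.Set.ofList ((List.range m).map f)) (f m)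
          = PySem.Set.ofList ((List.range m).map f) ++ [f m] := by
        simp [PySem.Set.add, PySem.Set.contains, List.contains_eq_mem, hnot]
      rw [hadd, ih (fun i k h1 h2 => H i k h1 (by omega)) (fun k hk => Hq k (by omega))]
      simp [hq]
    · have hm : m ≠ 0 ∧ f (m - 1) = f m := by
        have := (Hq m (by omega))
        by_contra hcon
        push Not at hcon
        rcases Nat.eq_zero_or_pos m with h0 | hpos
        · exact hq (this.mpr (Or.inl h0))
        · exact hq (this.mpr (Or.inr (hcon (by omega))))
      have hmem : f m ∈ PySem.Set.ofList ((List.range m).map f) := by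
        rw [PySem.Set.mem_ofList]
        exact List.mem_map.mpr ⟨m - 1, List.mem_range.mpr (by omega), hm.2⟩
      have hadd : PySem.Set.add (PySem.Set.ofList ((List.range m).map f)) (f m)
          = PySem.Set.ofList ((List.range m).map f) := by
        simp [PySem.Set.add, PySem.Set.contains, List.contains_eq_mem, hmem]
      rw [hadd, ih (fun i k h1 h2 => H i k h1 (by omega)) (fun k hk => Hq k (by omega))]
      simp [hq]

-- B's run-start block is exactly the deduplication of the full bucket
lemma pv_bucket_eq (cs : List Char) (d : Int) (h1 : 1 ≤ d) (h2 : d ≤ (cs.length : Int) - 2) :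
    ((PySem.List.pyRange 0 ((cs.length : Int) - d + 1)).filter
        (fun i => (i == 0) ||
          !(PySem.List.pyGet? cs (i - 1) == PySem.List.pyGet? cs (i - 1 + d)))).map
      (fun i => pvSub cs d i)
    = PySem.Set.ofList (pvBucket cs d) := by
  obtain ⟨dn, rfl⟩ : ∃ dn : Nat, d = (dn : Int) := ⟨d.toNat, (Int.toNat_of_nonneg (by omega)).symm⟩
  have hdn1 : 1 ≤ dn := by exact_mod_cast h1
  have hdn2 : dn + 2 ≤ cs.length := by omega
  set m : Nat := cs.length - dn + 1 with hm
  have hcast : (cs.length : Int) - (dn : Int) + 1 = (m : Int) := by omega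
  unfold pvBucket
  rw [hcast, PySem.List.pyRange_zero_natCast m, List.filter_map, List.map_map, List.map_map]
  have hsub : ∀ k : Nat, pvSub cs (dn : Int) ((k : Nat) : Int) = String.ofList (pvSubN cs dn k) :=
    fun k => pv_pvSub_natCast cs dn k
  refine (pv_ofList_range_runStarts (fun k => pvSub cs (dn : Int) ((k : Nat) : Int)) _ m ?_ ?_).symm
  · -- equal results of the same length force the left neighbour equal
    intro i k hik hkm hfik
    dsimp only at hfik ⊢
    rw [hsub i, hsub k] at hfik
    rw [hsub (k - 1), hsub k, String.ofList_inj]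
    have hkn : k ≤ cs.length := by omega
    have hchain := (pv_pvSubN_eq_iff cs dn i k (by omega) hkn).mp (String.ofList_inj.mp hfik)
    rw [pv_pvSubN_eq_iff cs dn (k - 1) k (by omega) hkn]
    intro t ht1 ht2
    exact hchain t (by omega) ht2
  · -- the Int-side filter test is the run-start condition
    intro k hkm
    simp only [Function.comp]
    by_cases hk0 : k = 0
    · subst hk0
      simp
    · have hk1 : 1 ≤ k := by omega
      have e1 : ((k : Nat) : Int) - 1 = (((k - 1 : Nat) : Nat) : Int) := by omega
      have e2 : (((k - 1 : Nat) : Nat) : Int) + (dn : Int) = (((k - 1 + dn : Nat) : Nat) : Int) := by omega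
      rw [e1, e2, PySem.List.pyGet?_natCast, PySem.List.pyGet?_natCast]
      have hne : pvSub cs (dn : Int) (((k - 1 : Nat) : Nat) : Int) ≠ pvSub cs (dn : Int) ((k : Nat) : Int)
          ↔ ¬ (cs[k - 1]? = cs[k - 1 + dn]?) := by
        rw [hsub (k - 1), hsub k, Ne, String.ofList_inj,
            pv_pvSubN_eq_iff cs dn (k - 1) k (by omega) (by omega)]
        constructor
        · intro h hc
          exact h (fun t ht1 ht2 => by
            have : t = k - 1 := by omega
            subst this; exact hc)
        · intro h hc
          exact h (hc (k - 1) (le_refl _) (by omega))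
      constructor
      · intro hb
        rcases Bool.or_eq_true_iff.mp hb with hb | hb
        · exfalso
          simp only [beq_iff_eq, Nat.cast_eq_zero] at hb
          omega
        · right
          rw [hne]
          simpa using hb
      · intro hb
        rcases hb with hb | hb
        · omega
        · apply Bool.or_eq_true_iff.mpr
          right
          rw [hne] at hb
          simpa using hb

-- A's composite key as a lexicographic value
lemma pv_sorted2_eq (xs : List String) (k1 : String → Int) :
    PySem.List.sorted2 xs k1 (fun s => s)
      = PySem.List.sorted xs (fun s => toLex (k1 s, s)) := by
  have hb : (fun (a b : String) => decide (k1 a < k1 b) || (!decide (k1 b < k1 a) && decide (a < b)))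
      = (fun (a b : String) => decide (toLex (k1 a, a) < toLex (k1 b, b))) := by
    funext a b
    rcases lt_trichotomy (k1 a) (k1 b) with h | h | h
    · simp [Prod.Lex.toLex_lt_toLex, h, asymm h]
    · simp [Prod.Lex.toLex_lt_toLex, h]
    · simp [Prod.Lex.toLex_lt_toLex, h, asymm h, h.ne']
  simp only [PySem.List.sorted2, PySem.List.sorted]
  rw [if_neg (by decide : ¬ (false = true)), if_neg (by decide : ¬ (false = true)), hb]

lemma pv_range_filter_lt : ∀ (n m : Nat), m ≤ n →
    (List.range n).filter (fun k => decide (k < m)) = List.range m := by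
  intro n
  induction n with
  | zero => intro m hm; have hm0 : m = 0 := by omega
            subst hm0; rfl
  | succ n ih =>
    intro m hm
    rcases Nat.lt_or_ge m (n+1) with h | h
    · have hm' : m ≤ n := by omega
      rw [List.range_succ, List.filter_append, ih m hm']
      simp [show ¬ (n < m) by omega]
    · have hm1 : m = n + 1 := by omega
      subst hm1
      rw [List.range_succ, List.filter_append]
      have hself : (List.range n).filter (fun k => decide (k < n+1)) = List.range n :=
        List.filter_eq_self.mpr (by intro k hk; simp only [List.mem_range] at hk
                                    simp only [decide_eq_true_eq]; omega)
      rw [hself]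
      simp

lemma pv_filter_pyRange (n : Nat) (d : Int) (h1 : 1 ≤ d) (h2 : d ≤ (n : Int) - 2) :
    (PySem.List.pyRange 0 (n : Int)).filter (fun i => decide (i + d ≤ (n : Int)))
      = PySem.List.pyRange 0 ((n : Int) - d + 1) := by
  have hm : ((n + 1 - d.toNat : Nat) : Int) = (n : Int) - d + 1 := by omega
  rw [PySem.List.pyRange_zero_natCast n, ← hm, PySem.List.pyRange_zero_natCast]
  rw [List.filter_map]
  have hcong : (List.range n).filter ((fun i => decide (i + d ≤ (n:Int))) ∘ (fun k : Nat => (k:Int)))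
      = (List.range n).filter (fun k => decide (k < n + 1 - d.toNat)) := by
    apply List.filter_congr
    intro k hk
    simp only [Function.comp, decide_eq_decide]
    omega
  rw [hcong, pv_range_filter_lt n _ (by omega)]

lemma pv_update_append : ∀ (l : List String) (acc s : PySem.Set String),
    (∀ x ∈ l, x ∉ acc) →
    PySem.Set.update (acc ++ s) l = acc ++ PySem.Set.update s l := by
  intro l
  induction l with
  | nil => intro acc s h; rfl
  | cons x t ih =>
    intro acc s h
    have hx : x ∉ acc := h x (List.mem_cons_self ..)
    have hadd : PySem.Set.add (acc ++ s) x = acc ++ PySem.Set.add s x := by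
      have hacc : List.contains acc x = false := by
        simp [List.contains_eq_mem, hx]
      simp only [PySem.Set.add, PySem.Set.contains, List.contains_append, hacc, Bool.false_or]
      by_cases hs : x ∈ s
      · simp [hs]
      · simp [hs, List.append_assoc]
    simp only [PySem.Set.update, List.foldl_cons]
    rw [hadd]
    have := ih acc (PySem.Set.add s x) (fun y hy => h y (List.mem_cons_of_mem _ hy))
    simpa [PySem.Set.update] using this

lemma pv_foldl_update_disjoint (f : Int → List String) : ∀ (ds : List Int) (acc : PySem.Set String),
    (∀ d ∈ ds, ∀ x ∈ f d, x ∉ acc) →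
    List.Pairwise (fun d1 d2 => ∀ x ∈ f d1, ∀ y ∈ f d2, x ≠ y) ds →
    List.foldl (fun a d => PySem.Set.update a (f d)) acc ds
      = acc ++ (ds.map (fun d => PySem.Set.ofList (f d))).flatten := by
  intro ds
  induction ds with
  | nil => intro acc _ _; simp
  | cons d t ih =>
    intro acc hdisj hpw
    rw [List.foldl_cons]
    have h1 : PySem.Set.update acc (f d) = acc ++ PySem.Set.ofList (f d) := by
      have h := pv_update_append (f d) acc [] (hdisj d (List.mem_cons_self ..))
      simpa [PySem.Set.ofList_eq_foldl, PySem.Set.update] using h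
    rw [h1]
    rw [ih (acc ++ PySem.Set.ofList (f d)) ?_ (List.pairwise_cons.mp hpw).2]
    · simp [List.append_assoc]
    · intro d' hd' x hx hmem
      rcases List.mem_append.mp hmem with hmem | hmem
      · exact hdisj d' (List.mem_cons_of_mem _ hd') x hx hmem
      · have hxfd : x ∈ f d := (PySem.Set.mem_ofList _ _).mp hmem
        exact (List.pairwise_cons.mp hpw).1 d' hd' x hxfd x hx rfl

lemma pv_length_pvSub (cs : List Char) (d i : Int) (hi0 : 0 ≤ i) (hid : i + d ≤ (cs.length : Int)) (hd0 : 0 ≤ d) :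
    ((pvSub cs d i).toList.length : Int) = (cs.length : Int) - d := by
  unfold pvSub
  rw [String.toList_ofList]
  rw [PySem.List.slice_to cs hi0, PySem.List.slice_from cs (show (0:Int) ≤ i + d by omega)]
  simp only [List.length_append, List.length_take, List.length_drop]
  omega

lemma pv_mem_bucket_length (cs : List Char) (d : Int) (x : String)
    (h1 : 1 ≤ d) (_h2 : d ≤ (cs.length : Int) - 2) (hx : x ∈ pvBucket cs d) :
    ((x.toList.length : Int)) = (cs.length : Int) - d := by
  unfold pvBucket at hx
  rcases List.mem_map.mp hx with ⟨i, hi, rfl⟩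
  rw [PySem.List.mem_pyRange_one] at hi
  exact pv_length_pvSub cs d i hi.1 (by omega) (by omega)

lemma pv_flatten_perm (F G : Int → List String) : ∀ ds : List Int,
    (∀ d ∈ ds, (F d).Perm (G d)) → ((ds.map F).flatten).Perm ((ds.map G).flatten) := by
  intro ds
  induction ds with
  | nil => intro _; simp
  | cons d t ih =>
    intro h
    simp only [List.map_cons, List.flatten_cons]
    exact (h d (List.mem_cons_self ..)).append (ih (fun d' hd' => h d' (List.mem_cons_of_mem _ hd')))

lemma pv_main (seq : String) : get_partials seq = get_partials_alt seq := by
  unfold get_partials get_partials_alt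
  set cs := seq.toList with hcs
  have hrange : ((cs.length : Int) - 2) + 1 = (cs.length : Int) - 1 := by ring
  rw [hrange]
  have hd_mem : ∀ d ∈ PySem.List.pyRange 1 ((cs.length : Int) - 1), 1 ≤ d ∧ d ≤ (cs.length:Int) - 2 := by
    intro d hd; rw [PySem.List.mem_pyRange_one] at hd; omega
  -- A's inner loop builds exactly the bucket of size-d deletions
  have hinner : ∀ (acc : PySem.Set String) (d : Int), d ∈ PySem.List.pyRange 1 ((cs.length : Int) - 1) →
      (PySem.List.pyRange 0 (cs.length:Int)).foldl
        (fun subseqs i => if i + d ≤ (cs.length:Int) then PySem.Set.add subseqs (pvSub cs d i) else subseqs) acc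
      = PySem.Set.update acc (pvBucket cs d) := by
    intro acc d hd
    obtain ⟨hd1, hd2⟩ := hd_mem d hd
    rw [PySem.List.foldl_ite_eq_foldl_filter (p := fun i => i + d ≤ (cs.length:Int))
        (f := fun acc i => PySem.Set.add acc (pvSub cs d i))]
    rw [pv_filter_pyRange cs.length d hd1 hd2]
    rw [← List.foldl_map (f := fun i => pvSub cs d i) (g := PySem.Set.add)]
    rfl
  -- A's set is the concatenation of the per-d deduplicated buckets
  have hA : (PySem.List.pyRange 1 ((cs.length : Int) - 1)).foldl
      (fun subseqs d =>
        (PySem.List.pyRange 0 (cs.length:Int)).foldl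
          (fun subseqs i => if i + d ≤ (cs.length:Int) then PySem.Set.add subseqs (pvSub cs d i) else subseqs)
          subseqs)
      PySem.Set.empty
      = ((PySem.List.pyRange 1 ((cs.length : Int) - 1)).map
          (fun d => PySem.Set.ofList (pvBucket cs d))).flatten := by
    rw [PySem.List.foldl_congr_mem (PySem.List.pyRange 1 ((cs.length : Int) - 1))
        (fun subseqs d =>
          (PySem.List.pyRange 0 (cs.length:Int)).foldl
            (fun subseqs i => if i + d ≤ (cs.length:Int) then PySem.Set.add subseqs (pvSub cs d i) else subseqs)
            subseqs)
        (fun acc d => PySem.Set.update acc (pvBucket cs d))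
        PySem.Set.empty
        (fun acc d hd => hinner acc d hd)]
    rw [pv_foldl_update_disjoint (fun d => pvBucket cs d) _ PySem.Set.empty
        (by intro d hd x hx hmem; simp [PySem.Set.empty] at hmem)
        (List.Pairwise.imp_of_mem
          (by intro d1 d2 hd1 hd2 hlt x hx y hy heq
              have l1 := pv_mem_bucket_length cs d1 x (hd_mem d1 hd1).1 (hd_mem d1 hd1).2 hx
              have l2 := pv_mem_bucket_length cs d2 y (hd_mem d2 hd2).1 (hd_mem d2 hd2).2 hy
              rw [heq] at l1; omega)
          (PySem.List.pairwise_lt_pyRange_one 1 ((cs.length:Int) - 1)))]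
    simp [PySem.Set.empty]
  rw [hA]
  -- B is the concatenation of the per-d sorted run-start blocks
  rw [PySem.List.foldl_append_eq_flatMap
      (g := fun d => PySem.List.sorted
        (((PySem.List.pyRange 0 ((cs.length : Int) - d + 1)).filter
            (fun i => (i == 0) ||
              !(PySem.List.pyGet? cs (i - 1) == PySem.List.pyGet? cs (i - 1 + d)))).map
          (fun i => pvSub cs d i))
        (fun s => s))]
  rw [List.nil_append, List.flatMap_def]
  -- each run-start block is the deduplicated bucket
  have hb : (PySem.List.pyRange 1 ((cs.length : Int) - 1)).map
        (fun d => PySem.List.sorted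
          (((PySem.List.pyRange 0 ((cs.length : Int) - d + 1)).filter
              (fun i => (i == 0) ||
                !(PySem.List.pyGet? cs (i - 1) == PySem.List.pyGet? cs (i - 1 + d)))).map
            (fun i => pvSub cs d i))
          (fun s => s))
      = (PySem.List.pyRange 1 ((cs.length : Int) - 1)).map
          (fun d => PySem.List.sorted (PySem.Set.ofList (pvBucket cs d)) (fun s => s)) :=
    List.map_congr_left (fun d hd => by
      rw [pv_bucket_eq cs d (hd_mem d hd).1 (hd_mem d hd).2])
  rw [hb]
  rw [pv_sorted2_eq]
  apply PySem.List.sorted_eq_of_perm_of_pairwise_lt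
  · exact pv_flatten_perm _ _ _ (fun d hd => PySem.List.sorted_perm _ _ _)
  · rw [List.pairwise_flatten]
    constructor
    · intro l hl
      rcases List.mem_map.mp hl with ⟨d, hd, rfl⟩
      refine List.Pairwise.imp_of_mem ?_ (PySem.List.sorted_ofList_pairwise_lt (pvBucket cs d))
      intro x y hx hy hxy
      have hx' : x ∈ pvBucket cs d :=
        (PySem.Set.mem_ofList _ _).mp ((PySem.List.mem_sorted _ _ _ _).mp hx)
      have hy' : y ∈ pvBucket cs d :=
        (PySem.Set.mem_ofList _ _).mp ((PySem.List.mem_sorted _ _ _ _).mp hy)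
      have l1 := pv_mem_bucket_length cs d x (hd_mem d hd).1 (hd_mem d hd).2 hx'
      have l2 := pv_mem_bucket_length cs d y (hd_mem d hd).1 (hd_mem d hd).2 hy'
      rw [Prod.Lex.toLex_lt_toLex]
      right
      exact ⟨by rw [PySem.Str.len_eq, PySem.Str.len_eq]; omega, hxy⟩
    · rw [List.pairwise_map]
      refine List.Pairwise.imp_of_mem ?_ (PySem.List.pairwise_lt_pyRange_one 1 ((cs.length:Int) - 1))
      intro d1 d2 hd1 hd2 hlt x hx y hy
      have hx' : x ∈ pvBucket cs d1 :=
        (PySem.Set.mem_ofList _ _).mp ((PySem.List.mem_sorted _ _ _ _).mp hx)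
      have hy' : y ∈ pvBucket cs d2 :=
        (PySem.Set.mem_ofList _ _).mp ((PySem.List.mem_sorted _ _ _ _).mp hy)
      have l1 := pv_mem_bucket_length cs d1 x (hd_mem d1 hd1).1 (hd_mem d1 hd1).2 hx'
      have l2 := pv_mem_bucket_length cs d2 y (hd_mem d2 hd2).1 (hd_mem d2 hd2).2 hy'
      rw [Prod.Lex.toLex_lt_toLex]
      left
      rw [PySem.Str.len_eq, PySem.Str.len_eq]
      omega

-- ===== VERDICT (by name: the statement is the Claim_ definition above) =====
theorem get_partials_spec : Claim_equal_get_partials := by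
  intro seq _
  exact pv_main seq
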